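-- pv_equiv track=rewrite | github.com/kuchyx/WUT_Computer_Science | program/code/main.py | string_length_no_whitespace
-- ===== SOURCE A (Python) =====
-- def string_length_no_whitespace(length_parameter):
--     """
--     Calculates string width without whitespace
--     """
--     i = 0
--     length_value = ""
--     for character in length_parameter:
--         if character.isalpha():
--             break
--         length_value += character
--         i += 1
--     return i, length_value
-- ===== SOURCE B (Python) =====
-- def string_length_no_whitespace(length_parameter):
--     """
--     Calculates string width without whitespace
--     """
--     n = next((i for i, c in enumerate(length_parameter) if c.isalpha()),
--              len(length_parameter))
--     return n, ''.join(length_parameter[:n])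
-- ===== Notes on version B (the rewrite author's own statement) =====
-- stated objective: idiomatic
-- what changed: Replaces the co-accumulating counter/string loop (break on alpha, += on both) with a find-the-boundary-then-slice decomposition: the index of the first alphabetic character is found once, and the answer is that index together with the joined prefix up to it.
import Mathlib
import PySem

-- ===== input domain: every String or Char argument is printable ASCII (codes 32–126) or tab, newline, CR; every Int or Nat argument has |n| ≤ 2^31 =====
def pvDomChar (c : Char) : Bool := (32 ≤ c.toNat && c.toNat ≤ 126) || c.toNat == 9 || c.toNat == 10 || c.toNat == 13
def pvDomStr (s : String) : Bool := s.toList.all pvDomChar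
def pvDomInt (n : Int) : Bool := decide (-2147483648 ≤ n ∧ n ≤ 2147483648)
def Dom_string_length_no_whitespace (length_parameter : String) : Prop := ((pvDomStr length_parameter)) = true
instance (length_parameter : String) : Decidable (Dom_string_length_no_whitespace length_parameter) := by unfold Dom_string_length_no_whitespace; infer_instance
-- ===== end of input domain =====

-- B replaces A's co-accumulating counter/string loop with a find-the-boundary-index-then-slice decomposition (idiomatic; same result).

-- ===== PORT A =====
-- A's for-loop with break: accumulate i and the prefix string, stop at the first alphabetic character.
def pvLoopA : List Char → Int → List Char → Int × List Char
  | [], i, acc => (i, acc)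
  | c :: cs, i, acc =>
      if PySem.Chars.isalpha c then (i, acc)
      else pvLoopA cs (i + 1) (acc ++ [c])

def string_length_no_whitespace (length_parameter : String) : Int × String :=
  let r := pvLoopA length_parameter.toList 0 []
  (r.1, String.mk r.2)

-- ===== PORT B =====
-- Source B: n = index of the first alphabetic character (or the length); return (n, joined prefix of length n).
def string_length_no_whitespace_alt (length_parameter : String) : Int × String :=
  let cs := length_parameter.toList
  let n := cs.findIdx (fun c => PySem.Chars.isalpha c)
  ((n : Int), String.mk (cs.take n))

-- ===== PRECONDITION & SPEC =====
def Spec_string_length_no_whitespace (length_parameter : String) (out : Int × String) : Prop := out = string_length_no_whitespace_alt length_parameter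
instance (length_parameter : String) (out : Int × String) : Decidable (Spec_string_length_no_whitespace length_parameter out) := by unfold Spec_string_length_no_whitespace; infer_instance

-- ===== CLAIM (what is proved, stated in full; the proofs are below) =====
def Claim_equal_string_length_no_whitespace : Prop := ∀ (length_parameter : String), Dom_string_length_no_whitespace length_parameter → Spec_string_length_no_whitespace length_parameter (string_length_no_whitespace length_parameter)

-- ===== LEMMAS AND PROOFS =====
theorem pvLoopA_eq (cs : List Char) : ∀ (i : Int) (acc : List Char),
    pvLoopA cs i acc =
      (i + (cs.findIdx (fun c => PySem.Chars.isalpha c) : Int),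
       acc ++ cs.take (cs.findIdx (fun c => PySem.Chars.isalpha c))) := by
  induction cs with
  | nil => intro i acc; simp [pvLoopA]
  | cons c cs ih =>
      intro i acc
      by_cases h : PySem.Chars.isalpha c
      · simp [pvLoopA, h, List.findIdx_cons]
      · simp only [pvLoopA, h, if_false, ih, List.findIdx_cons, Bool.false_eq_true,
          cond_false, List.take_succ_cons, List.append_assoc, List.singleton_append]
        congr 1
        push_cast; ring

-- ===== VERDICT (by name: the statement is the Claim_ definition above) =====
theorem string_length_no_whitespace_spec : Claim_equal_string_length_no_whitespace := by
  intro s _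
  unfold Spec_string_length_no_whitespace string_length_no_whitespace string_length_no_whitespace_alt
  simp [pvLoopA_eq]
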